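-- pv_equiv track=rewrite | github.com/shraavv/amfoss-tasks | task-04/CP_2.py | is_equilibrium
-- ===== SOURCE A (Python) =====
-- def is_equilibrium(vectors):
--
--     sum_x = sum_y = sum_z = 0
--
--
--     for i in vectors:
--         sum_x += i[0]
--         sum_y += i[1]
--         sum_z += i[2]
--
--     if sum_x == sum_y == sum_z == 0:
--         return "YES"
--     else:
--         return "NO"
-- ===== SOURCE B (Python) =====
-- def is_equilibrium(vectors):
--     # Divide-and-conquer: componentwise vector total by halving the list.
--     def total(vs):
--         if not vs:
--             return (0, 0, 0)
--         if len(vs) == 1: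
--             v = vs[0]
--             return (v[0], v[1], v[2])
--         mid = len(vs) // 2
--         a = total(vs[:mid])
--         b = total(vs[mid:])
--         return (a[0] + b[0], a[1] + b[1], a[2] + b[2])
--     return "YES" if total(vectors) == (0, 0, 0) else "NO"
-- ===== Notes on version B (the rewrite author's own statement) =====
-- stated objective: alternative
-- what changed: Replaces A's single linear loop over a triple accumulator with a recursive divide-and-conquer reduction: the list is split in half, each half's componentwise vector total is computed recursively, and the two partial totals are added before the zero test.
import Mathlib
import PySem

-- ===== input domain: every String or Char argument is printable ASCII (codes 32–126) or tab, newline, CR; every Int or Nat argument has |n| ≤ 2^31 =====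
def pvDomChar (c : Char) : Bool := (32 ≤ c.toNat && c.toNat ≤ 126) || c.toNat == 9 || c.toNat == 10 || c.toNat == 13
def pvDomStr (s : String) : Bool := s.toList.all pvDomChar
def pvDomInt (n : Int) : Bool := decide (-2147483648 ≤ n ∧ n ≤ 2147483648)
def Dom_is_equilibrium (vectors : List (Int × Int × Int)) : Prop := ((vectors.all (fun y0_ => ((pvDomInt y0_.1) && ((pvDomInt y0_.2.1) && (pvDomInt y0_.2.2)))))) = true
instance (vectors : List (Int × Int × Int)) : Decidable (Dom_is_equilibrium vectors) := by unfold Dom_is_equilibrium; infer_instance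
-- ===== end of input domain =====

-- B computes the componentwise vector total by divide-and-conquer (split, recurse on each half, add partial totals) instead of A's single linear triple-accumulator loop (objective: alternative).


-- ===== PORT A =====
-- Literal port of A: one loop folding a triple accumulator (sum_x, sum_y, sum_z).
def is_equilibrium (vectors : List (Int × Int × Int)) : String :=
  let s := vectors.foldl (fun acc i => (acc.1 + i.1, acc.2.1 + i.2.1, acc.2.2 + i.2.2)) ((0 : Int), (0 : Int), (0 : Int))
  if s.1 = s.2.1 ∧ s.2.1 = s.2.2 ∧ s.2.2 = 0 then "YES" else "NO"

-- ===== PORT B =====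
-- Port of B's helper 'total': divide-and-conquer componentwise vector sum
-- (vs[:mid] = take, vs[mid:] = drop; slice bounds are in range so this is exact).
def altTotal : List (Int × Int × Int) → Int × Int × Int
  | [] => (0, 0, 0)
  | [v] => v
  | v :: w :: rest =>
      let vs := v :: w :: rest
      let mid := vs.length / 2
      let a := altTotal (vs.take mid)
      let b := altTotal (vs.drop mid)
      (a.1 + b.1, a.2.1 + b.2.1, a.2.2 + b.2.2)
termination_by vs => vs.length
decreasing_by
  · simp [List.length_take]; omega
  · simp [List.length_drop]; omega

-- Port of B: zero test on the divide-and-conquer total.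
def is_equilibrium_alt (vectors : List (Int × Int × Int)) : String :=
  if altTotal vectors = (0, 0, 0) then "YES" else "NO"

-- ===== PRECONDITION & SPEC =====
def Spec_is_equilibrium (vectors : List (Int × Int × Int)) (out : String) : Prop := out = is_equilibrium_alt vectors
instance (vectors : List (Int × Int × Int)) (out : String) : Decidable (Spec_is_equilibrium vectors out) := by unfold Spec_is_equilibrium; infer_instance

-- ===== CLAIM (what is proved, stated in full; the proofs are below) =====
def Claim_equal_is_equilibrium : Prop := ∀ (vectors : List (Int × Int × Int)), Dom_is_equilibrium vectors → Spec_is_equilibrium vectors (is_equilibrium vectors)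

-- ===== LEMMAS AND PROOFS =====
lemma altTotal_bounded : ∀ (n : Nat) (vs : List (Int × Int × Int)), vs.length ≤ n →
    altTotal vs = ((vs.map (fun v => v.1)).sum, (vs.map (fun v => v.2.1)).sum, (vs.map (fun v => v.2.2)).sum) := by
  intro n
  induction n with
  | zero =>
      intro vs h
      cases vs with
      | nil => simp [altTotal]
      | cons a t => simp at h
  | succ n ih =>
      intro vs h
      cases vs with
      | nil => simp [altTotal]
      | cons v t =>
        cases t with
        | nil => simp [altTotal]
        | cons w rest =>
          rw [altTotal]
          rw [ih (List.take ((v :: w :: rest).length / 2) (v :: w :: rest))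
                (by simp [List.length_take] at h ⊢; omega),
              ih (List.drop ((v :: w :: rest).length / 2) (v :: w :: rest))
                (by simp [List.length_drop] at h ⊢; omega)]
          have h3 := List.take_append_drop ((v :: w :: rest).length / 2) (v :: w :: rest)
          conv_rhs => rw [← h3]
          simp

lemma altTotal_eq_sums (vs : List (Int × Int × Int)) :
    altTotal vs = ((vs.map (fun v => v.1)).sum, (vs.map (fun v => v.2.1)).sum, (vs.map (fun v => v.2.2)).sum) :=
  altTotal_bounded vs.length vs le_rfl

lemma foldl_triple (vectors : List (Int × Int × Int)) (a b c : Int) :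
    vectors.foldl (fun acc i => (acc.1 + i.1, acc.2.1 + i.2.1, acc.2.2 + i.2.2)) (a, b, c)
    = (a + (vectors.map (fun v => v.1)).sum,
       b + (vectors.map (fun v => v.2.1)).sum,
       c + (vectors.map (fun v => v.2.2)).sum) := by
  induction vectors generalizing a b c with
  | nil => simp
  | cons h t ih => simp [List.foldl, ih]; ring_nf; simp

-- ===== VERDICT (by name: the statement is the Claim_ definition above) =====
theorem is_equilibrium_spec : Claim_equal_is_equilibrium := by
  intro vectors _
  unfold Spec_is_equilibrium is_equilibrium is_equilibrium_alt
  rw [foldl_triple, altTotal_eq_sums]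
  simp only [zero_add, Prod.mk.injEq]
  have h : ((vectors.map (fun v => v.1)).sum = (vectors.map (fun v => v.2.1)).sum ∧
      (vectors.map (fun v => v.2.1)).sum = (vectors.map (fun v => v.2.2)).sum ∧
      (vectors.map (fun v => v.2.2)).sum = 0) ↔
      ((vectors.map (fun v => v.1)).sum = 0 ∧ (vectors.map (fun v => v.2.1)).sum = 0 ∧
      (vectors.map (fun v => v.2.2)).sum = 0) := by
    constructor <;> rintro ⟨h1, h2, h3⟩ <;> omega
  simp only [h]
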